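-- pv_equiv track=rewrite | github.com/gelaro/ComArch | simulator.py | bwBitBin
-- ===== SOURCE A (Python) =====
-- def bwBitBin(reg):
--     incrr = ''
--     bwB = ''
--     for i in range(0,len(reg)):
--         if reg[i] == '1':
--             bwB += '0'
--         else:
--             bwB += '1'
--     bw = int(bwB,2)+1 #backward bit(dec)+1
--     bw  = '{0:0b}'.format(bw) #change backward bit(dec) to Binary
--     s = len(reg)
--     for m in range(0,s-len(bw)): #Add bit
--         incrr += '0'
--     bw = incrr + bw
--     regA1 = incrBit1(bw,s)
--     return regA1
--
-- def incrBit1(bit,s):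
--     incr = ''
--     for n in range(0,32-s):
--         incr += '1' #when negative value ,add '1'
--     reg = incr + bit
--     return reg
-- ===== SOURCE B (Python) =====
-- def bwBitBin(reg):
--     # arithmetic two's complement: value of reg in one pass, then one string format
--     n = len(reg)
--     v = 0
--     for c in reg:
--         v = v * 2 + (c == '1')
--     return '1' * (32 - n) + format((1 << n) - v, 'b').zfill(n)
-- ===== Notes on version B (the rewrite author's own statement) =====
-- stated objective: simpler
-- what changed: B replaces A's build-inverted-string + int(...,2) + manual zero/one padding loops with one arithmetic pass (value of reg), a closed-form complement (1<<n)-v, and format/zfill plus string repetition.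
-- outside the precondition, e.g. on bwBitBin(''): A raises ValueError, B returns '111111111111111111111111111111111'
import Mathlib
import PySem

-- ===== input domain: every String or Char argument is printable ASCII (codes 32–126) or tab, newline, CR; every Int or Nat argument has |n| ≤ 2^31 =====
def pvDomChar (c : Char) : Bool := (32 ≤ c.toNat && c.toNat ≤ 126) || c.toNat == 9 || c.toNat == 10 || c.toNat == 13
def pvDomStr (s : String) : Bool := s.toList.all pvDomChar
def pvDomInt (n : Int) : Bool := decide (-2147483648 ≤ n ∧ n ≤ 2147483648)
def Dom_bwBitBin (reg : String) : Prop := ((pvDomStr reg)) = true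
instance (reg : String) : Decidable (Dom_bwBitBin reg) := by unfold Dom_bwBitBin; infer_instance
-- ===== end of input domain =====

-- B: one arithmetic pass over reg plus a closed-form complement and format/zfill replaces A's
-- inverted-string build, int(...,2) parse, and two manual padding loops (objective: simpler).


-- ===== PORT A =====
def incrBit1 (bit : String) (s : Int) : String :=
  let incr := (PySem.List.pyRange 0 (32 - s) 1).foldl (fun acc _ => acc ++ ['1']) ([] : List Char)
  String.ofList (incr ++ bit.toList)

def bwBitBin (reg : String) : String :=
  let bwB := (PySem.List.pyRange 0 (PySem.Str.len reg) 1).foldl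
    (fun acc i => acc ++ [if PySem.List.pyGetD reg.toList i ' ' = '1' then '0' else '1'])
    ([] : List Char)
  -- int(bwB, 2): bwB consists only of '0'/'1' by construction, so Python's base-2 parse is
  -- exactly this MSB-first fold; for empty bwB Python raises ValueError (excluded by Pre_).
  let bwNat := bwB.foldl (fun a c => 2 * a + (if c = '1' then 1 else 0)) 0
  -- '{0:0b}'.format: Nat.toDigits 2 gives the same binary digit string for a positive argument.
  let bw := Nat.toDigits 2 (bwNat + 1)
  let s := PySem.Str.len reg
  let incrr := (PySem.List.pyRange 0 (s - bw.length) 1).foldl (fun acc _ => acc ++ ['0']) ([] : List Char)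
  let bw2 := incrr ++ bw
  incrBit1 (String.ofList bw2) s

-- ===== PORT B =====
def bwBitBin_alt (reg : String) : String :=
  let n := reg.toList.length
  let v := reg.toList.foldl (fun a c => a * 2 + (if c = '1' then 1 else 0)) 0
  -- format((1 << n) - v, 'b'): exact, since v < 2^n so the Nat subtraction never truncates
  let bits := Nat.toDigits 2 (2 ^ n - v)
  -- '1' * (32 - n) + bits.zfill(n): Nat subtraction is Python's clamp-at-empty behaviour
  String.ofList (List.replicate (32 - n) '1' ++ (List.replicate (n - bits.length) '0' ++ bits))

-- ===== PRECONDITION & SPEC =====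
-- Pre_ excludes only the empty string, on which A raises ValueError (int('', 2)).
def Pre_bwBitBin (reg : String) : Prop := reg ≠ ""
instance (reg : String) : Decidable (Pre_bwBitBin reg) := by unfold Pre_bwBitBin; infer_instance
def pvWitness_bwBitBin : String := "1010"

def Spec_bwBitBin (reg : String) (out : String) : Prop := out = bwBitBin_alt reg
instance (reg : String) (out : String) : Decidable (Spec_bwBitBin reg out) := by unfold Spec_bwBitBin; infer_instance

-- ===== CLAIM (what is proved, stated in full; the proofs are below) =====
def Claim_equal_bwBitBin : Prop := ∀ (reg : String), Dom_bwBitBin reg → Pre_bwBitBin reg → Spec_bwBitBin reg (bwBitBin reg)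

-- ===== LEMMAS AND PROOFS =====

theorem foldl_append_const {α β : Type} (x : α) :
    ∀ (l : List β) (acc : List α),
      l.foldl (fun a _ => a ++ [x]) acc = acc ++ List.replicate l.length x := by
  intro l
  induction l with
  | nil => intro acc; simp
  | cons c cs ih =>
      intro acc
      simp [List.foldl_cons, ih, List.replicate_succ]

theorem foldl_append_map {α β : Type} (f : β → α) :
    ∀ (l : List β) (acc : List α),
      l.foldl (fun a c => a ++ [f c]) acc = acc ++ l.map f := by
  intro l
  induction l with
  | nil => intro acc; simp
  | cons c cs ih =>
      intro acc
      simp [List.foldl_cons, ih]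

theorem parse_invert :
    ∀ (cs : List Char) (a b : Nat),
      (cs.map (fun c => if c = '1' then '0' else '1')).foldl
          (fun a c => 2 * a + (if c = '1' then 1 else 0)) a
        + cs.foldl (fun a c => a * 2 + (if c = '1' then 1 else 0)) b + 1
      = (a + b + 1) * 2 ^ cs.length := by
  intro cs
  induction cs with
  | nil => intro a b; simp
  | cons c cs ih =>
      intro a b
      by_cases hc : c = '1' <;>
        simp [hc, List.foldl_cons, ih, pow_succ] <;> ring_nf

-- ===== VERDICT (by name: the statement is the Claim_ definition above) =====

theorem bwBitBin_spec : Claim_equal_bwBitBin := by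
  intro reg _ hpre
  have hne : reg.toList ≠ [] := by
    intro h; apply hpre; rwa [String.toList_eq_nil_iff] at h
  have h1 :
      (PySem.List.pyRange 0 ((reg.toList.length : Int)) 1).foldl
        (fun acc i => acc ++ [if PySem.List.pyGetD reg.toList i ' ' = '1' then '0' else '1'])
        ([] : List Char)
      = reg.toList.map (fun c => if c = '1' then '0' else '1') := by
    rw [PySem.List.foldl_pyRange_zero_pyGetD' reg.toList ' '
        (fun acc c => acc ++ [if c = '1' then '0' else '1']) []]
    exact foldl_append_map _ _ _
  have h2 : ∀ (k : Int) (x : Char),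
      (PySem.List.pyRange 0 k 1).foldl (fun acc _ => acc ++ [x]) ([] : List Char)
      = List.replicate k.toNat x := by
    intro k x
    rw [foldl_append_const]
    simp [PySem.List.length_pyRange_one 0 k]
  have hnum :
      (reg.toList.map (fun c => if c = '1' then '0' else '1')).foldl
          (fun a c => 2 * a + (if c = '1' then 1 else 0)) 0 + 1
      = 2 ^ reg.toList.length
        - reg.toList.foldl (fun a c => a * 2 + (if c = '1' then 1 else 0)) 0 := by
    have := parse_invert reg.toList 0 0
    omega
  have h3 : ((32 : Int) - (reg.toList.length : Int)).toNat = 32 - reg.toList.length := by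
    omega
  have h4 : ∀ (m L : Nat), ((m : Int) - (L : Int)).toNat = m - L := by
    intro m L; omega
  unfold Spec_bwBitBin bwBitBin bwBitBin_alt incrBit1
  simp only [PySem.Str.len_eq, h2, String.toList_ofList, h1, hnum, h3, h4]
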